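-- pv_equiv track=rewrite | github.com/VeritasCurat/Synja | project/dialog/NLU_DE.py | parse_thema
-- ===== SOURCE A (Python) =====
-- def levenshtein(s, t):
--   #source: https://en.wikibooks.org/wiki/Algorithm_Implementation/Strings/Levenshtein_distance
--   #From Wikipedia article; Iterative with two matrix rows.
--   if s == t: return 0
--   elif len(s) == 0: return len(t)
--   elif len(t) == 0: return len(s)
--   v0 = [None] * (len(t) + 1)
--   v1 = [None] * (len(t) + 1)
--   for i in range(len(v0)):
--       v0[i] = i
--   for i in range(len(s)):
--       v1[0] = i + 1
--       for j in range(len(t)):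
--           cost = 0 if s[i] == t[j] else 1
--           v1[j + 1] = min(v1[j] + 1, v0[j + 1] + 1, v0[j] + cost)
--       for j in range(len(v0)):
--           v0[j] = v1[j]
--   return v1[len(t)]
--
-- def parse_thema(eingabe):
--   String = ""
--   parsetext = eingabe.split(' ')
--   for word in parsetext:
--     String = word
--     if(levenshtein(String, "Kontrollstrukturen") <= 2):return "controll structures"
--     elif(levenshtein(String, "Programmstruktur") <= 2):return "programm structure"
--     elif(levenshtein(String, "Grundlagen") <= 2):return "basics"
--     elif(levenshtein(String, "Arrays") <= 2):return "arrays"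
--     elif(levenshtein(String, "Operatoren") <= 2):return "operators"
--     elif(levenshtein(String, "Anweisungen") <= 2):return "statements"
--     elif(levenshtein(String, "Methoden") <= 2):return "methods"
--     elif(levenshtein(String, "Klassen") <= 2):return "classes"
--
--   return ""
-- ===== SOURCE B (Python) =====
-- TOPICS = [
--     ("Kontrollstrukturen", "controll structures"),
--     ("Programmstruktur", "programm structure"),
--     ("Grundlagen", "basics"),
--     ("Arrays", "arrays"),
--     ("Operatoren", "operators"),
--     ("Anweisungen", "statements"),
--     ("Methoden", "methods"),
--     ("Klassen", "classes"),
-- ]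
--
--
-- def _within(s, t, i, j, k):
--     # is the edit distance of s[:i] and t[:j] at most k?  (budget-bounded search,
--     # stripping a common suffix before spending budget)
--     while i > 0 and j > 0 and s[i - 1] == t[j - 1]:
--         i -= 1
--         j -= 1
--     if i == 0:
--         return j <= k
--     if j == 0:
--         return i <= k
--     if k == 0:
--         return False
--     return (_within(s, t, i - 1, j - 1, k - 1)
--             or _within(s, t, i - 1, j, k - 1)
--             or _within(s, t, i, j - 1, k - 1))
--
--
-- def _close(word, kw):
--     if abs(len(word) - len(kw)) > 2:
--         return False
--     return _within(word, kw, len(word), len(kw), 2)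
--
--
-- def parse_thema(eingabe):
--     for word in eingabe.split(' '):
--         for kw, cat in TOPICS:
--             if _close(word, kw):
--                 return cat
--     return ""
-- ===== Notes on version B (the rewrite author's own statement) =====
-- stated objective: faster
-- what changed: Replaces the full two-row Levenshtein DP per word-keyword pair by a budget-2 bounded edit-distance test: a length-difference pre-filter, common-suffix stripping, then a depth-3 branching search, so each comparison does O(1) work after the strip instead of filling an O(|word|*|kw|) table.
import Mathlib
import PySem

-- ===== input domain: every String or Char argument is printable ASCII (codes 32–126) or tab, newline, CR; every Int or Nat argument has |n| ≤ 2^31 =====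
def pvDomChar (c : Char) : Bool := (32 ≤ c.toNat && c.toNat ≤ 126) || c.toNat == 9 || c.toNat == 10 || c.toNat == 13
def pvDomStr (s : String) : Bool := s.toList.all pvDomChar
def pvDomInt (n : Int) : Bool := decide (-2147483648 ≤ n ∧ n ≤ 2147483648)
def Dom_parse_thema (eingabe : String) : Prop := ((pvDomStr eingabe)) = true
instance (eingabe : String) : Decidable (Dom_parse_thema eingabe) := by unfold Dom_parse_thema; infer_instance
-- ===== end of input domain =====

-- B replaces the full two-row Levenshtein DP by a budget-2 bounded edit-distance search
-- with a length pre-filter; faster by doing O(1)/bounded work per word-keyword pair.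

-- ===== PORT A =====
-- inner j-loop of levenshtein: v1[j+1] = min(v1[j]+1, v0[j+1]+1, v0[j]+cost)
def pvRowAux (c : Char) : List Char → List Nat → Nat → List Nat
  | tc :: ts, a :: b :: rest, left =>
    let cost : Nat := if c = tc then 0 else 1
    let x := min (left + 1) (min (b + 1) (a + cost))
    x :: pvRowAux c ts (b :: rest) x
  | _, _, _ => []

def pvLevChars (s t : List Char) : Nat :=
  if s = t then 0
  else if s.length = 0 then t.length
  else if t.length = 0 then s.length
  else
    let v0 := List.range (t.length + 1)
    let vfin := (List.range s.length).foldl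
      (fun v i => (i + 1) :: pvRowAux (s[i]!) t v (i + 1)) v0
    vfin.getD t.length 0

def pvLevenshtein (s t : String) : Nat := pvLevChars s.toList t.toList

def pvLoopA : List String → String
  | [] => ""
  | w :: ws =>
    if pvLevenshtein w "Kontrollstrukturen" ≤ 2 then "controll structures"
    else if pvLevenshtein w "Programmstruktur" ≤ 2 then "programm structure"
    else if pvLevenshtein w "Grundlagen" ≤ 2 then "basics"
    else if pvLevenshtein w "Arrays" ≤ 2 then "arrays"
    else if pvLevenshtein w "Operatoren" ≤ 2 then "operators"
    else if pvLevenshtein w "Anweisungen" ≤ 2 then "statements"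
    else if pvLevenshtein w "Methoden" ≤ 2 then "methods"
    else if pvLevenshtein w "Klassen" ≤ 2 then "classes"
    else pvLoopA ws

def parse_thema (eingabe : String) : String :=
  pvLoopA ((PySem.Str.split? eingabe " ").getD [])

-- ===== PORT B =====
def pvTopics : List (String × String) :=
  [("Kontrollstrukturen", "controll structures"),
   ("Programmstruktur", "programm structure"),
   ("Grundlagen", "basics"),
   ("Arrays", "arrays"),
   ("Operatoren", "operators"),
   ("Anweisungen", "statements"),
   ("Methoden", "methods"),
   ("Klassen", "classes")]

-- termination measure facts for pvWithin (kept tiny on purpose)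
theorem pvDecStrip (i j k : Nat) (hi : 0 < i) :
    i - 1 + (j - 1) + k < i + j + k :=
  add_lt_add_of_lt_of_le
    (add_lt_add_of_lt_of_le (Nat.sub_lt hi Nat.one_pos) (Nat.sub_le j 1)) (Nat.le_refl k)

theorem pvDecBudget (i j k : Nat) (hk : ¬ k = 0) (a b : Nat)
    (ha : a ≤ i) (hb : b ≤ j) : a + b + (k - 1) < i + j + k :=
  Nat.lt_of_le_of_lt (Nat.add_le_add (Nat.add_le_add ha hb) (Nat.le_refl (k - 1)))
    (Nat.add_lt_add_of_le_of_lt (Nat.le_refl (i + j))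
      (Nat.sub_lt (Nat.pos_of_ne_zero hk) Nat.one_pos))

-- _within: the while loop stripping a common suffix is the first recursive branch
def pvWithin (s t : List Char) (i j k : Nat) : Bool :=
  if h : 0 < i ∧ 0 < j ∧ s[i - 1]! = t[j - 1]! then
    pvWithin s t (i - 1) (j - 1) k
  else if i = 0 then decide (j ≤ k)
  else if j = 0 then decide (i ≤ k)
  else if k = 0 then false
  else
    pvWithin s t (i - 1) (j - 1) (k - 1) ||
    pvWithin s t (i - 1) j (k - 1) ||
    pvWithin s t i (j - 1) (k - 1)
termination_by i + j + k
decreasing_by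
  · exact pvDecStrip i j k h.1
  · rename_i h4
    exact pvDecBudget i j k h4 _ _ (Nat.sub_le i 1) (Nat.sub_le j 1)
  · rename_i h4
    exact pvDecBudget i j k h4 _ _ (Nat.sub_le i 1) (Nat.le_refl j)
  · rename_i h4
    exact pvDecBudget i j k h4 _ _ (Nat.le_refl i) (Nat.sub_le j 1)

def pvClose (word kw : String) : Bool :=
  if ((word.toList.length : Int) - (kw.toList.length : Int)).natAbs > 2 then false
  else pvWithin word.toList kw.toList word.toList.length kw.toList.length 2

def pvLoopB : List String → String
  | [] => ""
  | w :: ws =>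
    match pvTopics.findSome? (fun p => if pvClose w p.1 then some p.2 else none) with
    | some cat => cat
    | none => pvLoopB ws

def parse_thema_alt (eingabe : String) : String :=
  pvLoopB ((PySem.Str.split? eingabe " ").getD [])

-- ===== PRECONDITION & SPEC =====
def Spec_parse_thema (eingabe : String) (out : String) : Prop := out = parse_thema_alt eingabe
instance (eingabe : String) (out : String) : Decidable (Spec_parse_thema eingabe out) := by unfold Spec_parse_thema; infer_instance

-- ===== CLAIM (what is proved, stated in full; the proofs are below) =====
def Claim_equal_parse_thema : Prop := ∀ (eingabe : String), Dom_parse_thema eingabe → Spec_parse_thema eingabe (parse_thema eingabe)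

-- ===== LEMMAS AND PROOFS =====

-- reference: prefix edit distance of s[:i] and t[:j]
def pvLevP (s t : List Char) : Nat → Nat → Nat
  | 0, j => j
  | i + 1, 0 => i + 1
  | i + 1, j + 1 =>
    if s[i]! = t[j]! then pvLevP s t i j
    else 1 + min (pvLevP s t i (j + 1)) (min (pvLevP s t (i + 1) j) (pvLevP s t i j))

theorem pvLevP_zero_left (s t : List Char) (j : Nat) : pvLevP s t 0 j = j := by
  cases j <;> simp [pvLevP]

theorem pvLevP_zero_right (s t : List Char) (i : Nat) : pvLevP s t i 0 = i := by
  cases i <;> simp [pvLevP]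

theorem pvLevP_bounds (s t : List Char) :
    ∀ n i j, i + j ≤ n → i ≤ j + pvLevP s t i j ∧ j ≤ i + pvLevP s t i j := by
  intro n
  induction n with
  | zero =>
    intro i j h
    obtain ⟨rfl, rfl⟩ : i = 0 ∧ j = 0 := by omega
    simp [pvLevP]
  | succ n ih =>
    intro i j h
    match i, j with
    | 0, j => simp [pvLevP_zero_left]
    | i + 1, 0 => simp [pvLevP_zero_right]
    | i + 1, j + 1 =>
      have h1 := ih i j (by omega)
      have h2 := ih i (j + 1) (by omega)
      have h3 := ih (i + 1) j (by omega)
      rw [pvLevP]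
      split <;> omega

theorem pvLevP_adj (s t : List Char) :
    ∀ n i j, i + j ≤ n →
      pvLevP s t i j ≤ pvLevP s t (i + 1) j + 1 ∧
      pvLevP s t i j ≤ pvLevP s t i (j + 1) + 1 ∧
      pvLevP s t (i + 1) j ≤ pvLevP s t i j + 1 ∧
      pvLevP s t i (j + 1) ≤ pvLevP s t i j + 1 := by
  intro n
  induction n with
  | zero =>
    intro i j h
    obtain ⟨rfl, rfl⟩ : i = 0 ∧ j = 0 := by omega
    refine ⟨?_, ?_, ?_, ?_⟩ <;>
      simp [pvLevP_zero_left, pvLevP_zero_right]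
  | succ n ih =>
    intro i j h
    refine ⟨?_, ?_, ?_, ?_⟩
    · -- pvLevP i j ≤ pvLevP (i+1) j + 1
      cases j with
      | zero => rw [pvLevP_zero_right, pvLevP_zero_right]; omega
      | succ j' =>
        have hd := ih i j' (by omega)
        rw [show pvLevP s t (i + 1) (j' + 1) = _ from by rw [pvLevP]]
        split <;> omega
    · -- pvLevP i j ≤ pvLevP i (j+1) + 1
      cases i with
      | zero => rw [pvLevP_zero_left, pvLevP_zero_left]; omega
      | succ i' =>
        have hd := ih i' j (by omega)
        rw [show pvLevP s t (i' + 1) (j + 1) = _ from by rw [pvLevP]]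
        split <;> omega
    · -- pvLevP (i+1) j ≤ pvLevP i j + 1
      cases j with
      | zero => rw [pvLevP_zero_right, pvLevP_zero_right]
      | succ j' =>
        have hd := ih i j' (by omega)
        rw [show pvLevP s t (i + 1) (j' + 1) = _ from by rw [pvLevP]]
        split <;> omega
    · -- pvLevP i (j+1) ≤ pvLevP i j + 1
      cases i with
      | zero => rw [pvLevP_zero_left, pvLevP_zero_left]
      | succ i' =>
        have hd := ih i' j (by omega)
        rw [show pvLevP s t (i' + 1) (j + 1) = _ from by rw [pvLevP]]
        split <;> omega

theorem pvLevP_rec (s t : List Char) (i j : Nat) :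
    pvLevP s t (i + 1) (j + 1) =
      min (pvLevP s t (i + 1) j + 1)
        (min (pvLevP s t i (j + 1) + 1)
          (pvLevP s t i j + if s[i]! = t[j]! then 0 else 1)) := by
  have hadj := pvLevP_adj s t (i + j) i j (le_refl _)
  rw [pvLevP]
  split <;> omega

theorem pvLevP_self (s : List Char) : ∀ i, pvLevP s s i i = 0 := by
  intro i
  induction i with
  | zero => rw [pvLevP_zero_left]
  | succ i ih => rw [pvLevP]; simp [ih]

theorem pvRowAux_spec (s t : List Char) (m : Nat) :
    ∀ cnt j, j + cnt = t.length →
      pvRowAux (s[m]!) (t.drop j) ((List.range' j (cnt + 1)).map (pvLevP s t m))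
          (pvLevP s t (m + 1) j)
        = (List.range' (j + 1) cnt).map (pvLevP s t (m + 1)) := by
  intro cnt
  induction cnt with
  | zero =>
    intro j hj
    rw [List.drop_of_length_le (by omega)]
    simp [pvRowAux]
  | succ cnt ih =>
    intro j hj
    have hjlt : j < t.length := by omega
    rw [List.drop_eq_getElem_cons hjlt]
    rw [show List.range' j (cnt + 1 + 1) = j :: (j + 1) :: List.range' (j + 2) cnt from by
      rw [List.range'_succ, List.range'_succ]]
    simp only [List.map_cons, pvRowAux]
    rw [show t[j] = t[j]! from (getElem!_pos t j hjlt).symm]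
    rw [← pvLevP_rec s t m j]
    have ih' := ih (j + 1) (by omega)
    rw [show List.range' (j + 1) (cnt + 1) = (j + 1) :: List.range' (j + 2) cnt from by
      rw [List.range'_succ]] at ih'
    rw [List.map_cons] at ih'
    rw [ih']
    rw [show List.range' (j + 1) (cnt + 1) = (j + 1) :: List.range' (j + 2) cnt from by
      rw [List.range'_succ]]
    rw [List.map_cons]

theorem pvFold_spec (s t : List Char) :
    ∀ m,
      (List.range m).foldl
          (fun v i => (i + 1) :: pvRowAux (s[i]!) t v (i + 1)) (List.range (t.length + 1))
        = (List.range (t.length + 1)).map (pvLevP s t m) := by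
  intro m
  induction m with
  | zero =>
    simp only [List.range_zero, List.foldl_nil]
    have h : ∀ x ∈ List.range (t.length + 1), pvLevP s t 0 x = id x :=
      fun x _ => pvLevP_zero_left s t x
    rw [List.map_congr_left h, List.map_id]
  | succ m ih =>
    rw [show List.range (m + 1) = List.range m ++ [m] from List.range_succ, List.foldl_append, ih]
    simp only [List.foldl_cons, List.foldl_nil]
    have hrow := pvRowAux_spec s t m t.length 0 (by omega)
    rw [List.drop_zero, pvLevP_zero_right] at hrow
    rw [List.range_eq_range']
    rw [show List.range' 0 (t.length + 1) = 0 :: List.range' 1 t.length from by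
      rw [List.range'_succ]]
    rw [show List.range' 0 (t.length + 1) = 0 :: List.range' 1 t.length from by
      rw [List.range'_succ]] at hrow
    simp only [List.map_cons, pvLevP_zero_right]
    simp only [List.map_cons, pvLevP_zero_right] at hrow
    rw [hrow]

theorem pvLevChars_eq (s t : List Char) : pvLevChars s t = pvLevP s t s.length t.length := by
  unfold pvLevChars
  split
  · rename_i hst
    subst hst
    exact (pvLevP_self s s.length).symm
  split
  · rename_i hs
    rw [hs, pvLevP_zero_left]
  split
  · rename_i ht
    rw [ht, pvLevP_zero_right]
  · simp only
    rw [pvFold_spec s t s.length]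
    rw [List.getD_eq_getElem?_getD, List.getElem?_map, List.getElem?_range (by omega)]
    simp

theorem pvWithin_eq (s t : List Char) :
    ∀ n k i j, i + j + k ≤ n → pvWithin s t i j k = decide (pvLevP s t i j ≤ k) := by
  intro n
  induction n with
  | zero =>
    intro k i j h
    have hi : i = 0 := by omega
    have hj : j = 0 := by omega
    have hk : k = 0 := by omega
    subst hi; subst hj; subst hk
    rw [pvWithin]
    simp [pvLevP]
  | succ n ih =>
    intro k i j h
    rw [pvWithin]
    split
    · rename_i hc
      obtain ⟨hi, hj, hch⟩ := hc
      obtain ⟨i', rfl⟩ : ∃ i', i = i' + 1 := ⟨i - 1, by omega⟩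
      obtain ⟨j', rfl⟩ : ∃ j', j = j' + 1 := ⟨j - 1, by omega⟩
      simp only [Nat.add_sub_cancel] at hch ⊢
      rw [ih k i' j' (by omega)]
      rw [show pvLevP s t (i' + 1) (j' + 1) = pvLevP s t i' j' from by rw [pvLevP]; simp [hch]]
    · rename_i hc
      split
      · rename_i hi; rw [hi, pvLevP_zero_left]
      split
      · rename_i hj; rw [hj, pvLevP_zero_right]
      split
      · rename_i hi hj hk
        obtain ⟨i', rfl⟩ : ∃ i', i = i' + 1 := ⟨i - 1, by omega⟩
        obtain ⟨j', rfl⟩ : ∃ j', j = j' + 1 := ⟨j - 1, by omega⟩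
        have hch : ¬ (s[i']! = t[j']!) := by
          intro hc'; exact hc ⟨by omega, by omega, by simpa using hc'⟩
        rw [hk, show pvLevP s t (i' + 1) (j' + 1) = _ from by rw [pvLevP], if_neg hch]
        symm
        rw [decide_eq_false_iff_not]
        omega
      · rename_i hi hj hk
        obtain ⟨i', rfl⟩ : ∃ i', i = i' + 1 := ⟨i - 1, by omega⟩
        obtain ⟨j', rfl⟩ : ∃ j', j = j' + 1 := ⟨j - 1, by omega⟩
        obtain ⟨k', rfl⟩ : ∃ k', k = k' + 1 := ⟨k - 1, by omega⟩
        have hch : ¬ (s[i']! = t[j']!) := by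
          intro hc'; exact hc ⟨by omega, by omega, by simpa using hc'⟩
        simp only [Nat.add_sub_cancel]
        rw [ih k' i' j' (by omega), ih k' i' (j' + 1) (by omega), ih k' (i' + 1) j' (by omega)]
        rw [show pvLevP s t (i' + 1) (j' + 1) = _ from by rw [pvLevP]]
        rw [if_neg hch, Bool.eq_iff_iff]
        simp only [Bool.or_eq_true, decide_eq_true_eq]
        omega

theorem pvClose_eq (w kw : String) :
    pvClose w kw = decide (pvLevenshtein w kw ≤ 2) := by
  unfold pvClose pvLevenshtein
  rw [pvLevChars_eq]
  split
  · rename_i hlen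
    have hb := pvLevP_bounds w.toList kw.toList (w.toList.length + kw.toList.length)
      w.toList.length kw.toList.length (le_refl _)
    symm
    rw [decide_eq_false_iff_not]
    omega
  · exact pvWithin_eq w.toList kw.toList (w.toList.length + kw.toList.length + 2) 2 _ _ (le_refl _)

theorem pvLoop_eq (ws : List String) : pvLoopA ws = pvLoopB ws := by
  induction ws with
  | nil => rfl
  | cons w ws ih =>
    simp only [pvLoopA, pvLoopB, pvTopics, List.findSome?_cons, pvClose_eq]
    by_cases h1 : pvLevenshtein w "Kontrollstrukturen" ≤ 2
    · simp [h1]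
    simp only [h1, decide_false, Bool.false_eq_true, if_false]
    by_cases h2 : pvLevenshtein w "Programmstruktur" ≤ 2
    · simp [h2]
    simp only [h2, decide_false, Bool.false_eq_true, if_false]
    by_cases h3 : pvLevenshtein w "Grundlagen" ≤ 2
    · simp [h3]
    simp only [h3, decide_false, Bool.false_eq_true, if_false]
    by_cases h4 : pvLevenshtein w "Arrays" ≤ 2
    · simp [h4]
    simp only [h4, decide_false, Bool.false_eq_true, if_false]
    by_cases h5 : pvLevenshtein w "Operatoren" ≤ 2
    · simp [h5]
    simp only [h5, decide_false, Bool.false_eq_true, if_false]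
    by_cases h6 : pvLevenshtein w "Anweisungen" ≤ 2
    · simp [h6]
    simp only [h6, decide_false, Bool.false_eq_true, if_false]
    by_cases h7 : pvLevenshtein w "Methoden" ≤ 2
    · simp [h7]
    simp only [h7, decide_false, Bool.false_eq_true, if_false]
    by_cases h8 : pvLevenshtein w "Klassen" ≤ 2
    · simp [h8]
    simp only [h8, decide_false, Bool.false_eq_true, if_false]
    exact ih

-- ===== VERDICT (by name: the statement is the Claim_ definition above) =====
theorem parse_thema_spec : Claim_equal_parse_thema := by
  intro eingabe _
  unfold Spec_parse_thema parse_thema parse_thema_alt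
  exact pvLoop_eq _
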